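-- pv_equiv track=rewrite | github.com/frontloss/GPU_Validation_Infrastructure | DisplayAutomation2.0/Tests/PlanesUI/Common/planes_ui_verification.py | get_first_and_last_entry
-- ===== SOURCE A (Python) =====
-- from collections import OrderedDict
--
-- def get_first_and_last_entry(flip_data, notify_data):
--     flip_layers = OrderedDict()
--     notify_layers = OrderedDict()
--     no_of_layers = 3
--
--     ##
--     # Get starting present id for each layer in ETL for flip data
--     for layer_index in range(0, no_of_layers):
--         for present_id in flip_data:
--             if layer_index == flip_data[present_id]["PlaneInfo"][0][1]:
--                 flip_layers[layer_index] = []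
--                 flip_layers[layer_index].append(present_id)
--                 break
--
--     ##
--     # Get last present id for each layer in ETL for flip data
--     for layer_index in range(0, no_of_layers):
--         for present_id in reversed(flip_data):
--             if layer_index == flip_data[present_id]["PlaneInfo"][0][1]:
--                 flip_layers[layer_index].append(present_id)
--                 break
--
--     ##
--     # Get starting present id for each layer in ETL for notify data
--     for layer_index in range(0, no_of_layers):
--         for present_id in notify_data:
--             if layer_index == notify_data[present_id][0]:
--                 notify_layers[layer_index] = []
--                 notify_layers[layer_index].append(present_id)
--                 break
--
--     ##
--     # Get last present id for each layer in ETL for notify data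
--     for layer_index in range(0, no_of_layers):
--         for present_id in reversed(notify_data):
--             if layer_index == notify_data[present_id][0]:
--                 notify_layers[layer_index].append(present_id)
--                 break
--
--     return flip_layers, notify_layers
-- ===== SOURCE B (Python) =====
-- from collections import OrderedDict
--
-- def get_first_and_last_entry(flip_data, notify_data):
--     no_of_layers = 3
--
--     def scan(pids, data, layer_of):
--         # one pass recording the first-seen present id per layer; stop once layers 0..2 are all seen
--         found = {}
--         for pid in pids:
--             if all(l in found for l in range(no_of_layers)):
--                 break
--             layer = layer_of(data[pid])
--             if layer not in found:
--                 found[layer] = pid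
--         return found
--
--     def build(data, layer_of):
--         first = scan(data, data, layer_of)
--         last = scan(reversed(data), data, layer_of)
--         return OrderedDict((l, [first[l], last[l]]) for l in range(no_of_layers) if l in first)
--
--     return (build(flip_data, lambda v: v["PlaneInfo"][0][1]),
--             build(notify_data, lambda v: v[0]))
-- ===== Notes on version B (the rewrite author's own statement) =====
-- stated objective: simpler
-- what changed: A's twelve per-layer break-early scans (3 layers x first/last x flip/notify) are replaced by two early-stopped passes per dict - forward for first ids, backward for last ids, each recording the first-seen present id per layer and stopping once layers 0..2 are all seen - plus an OrderedDict rebuild in layer order 0..2.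
import Mathlib
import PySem

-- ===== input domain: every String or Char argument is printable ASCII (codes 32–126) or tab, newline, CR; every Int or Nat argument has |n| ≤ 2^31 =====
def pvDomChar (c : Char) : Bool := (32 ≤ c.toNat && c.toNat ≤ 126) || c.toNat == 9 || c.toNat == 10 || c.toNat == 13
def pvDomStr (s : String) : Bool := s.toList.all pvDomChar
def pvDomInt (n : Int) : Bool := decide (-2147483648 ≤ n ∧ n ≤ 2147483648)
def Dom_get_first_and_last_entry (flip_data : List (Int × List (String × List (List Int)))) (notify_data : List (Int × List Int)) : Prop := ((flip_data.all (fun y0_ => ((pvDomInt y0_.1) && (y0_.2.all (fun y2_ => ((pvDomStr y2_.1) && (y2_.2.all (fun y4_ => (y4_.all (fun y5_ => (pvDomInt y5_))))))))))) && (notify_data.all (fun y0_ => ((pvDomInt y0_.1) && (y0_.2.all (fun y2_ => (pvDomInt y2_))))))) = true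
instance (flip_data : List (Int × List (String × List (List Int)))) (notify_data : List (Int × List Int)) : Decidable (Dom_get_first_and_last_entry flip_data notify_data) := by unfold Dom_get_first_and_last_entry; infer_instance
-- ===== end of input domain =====

-- B replaces A's twelve break-early scans (3 layers × first/last × flip/notify) by two
-- early-stopped passes per dict — forward for first ids, backward for last ids, recording the
-- first-seen present id per layer and stopping once layers 0, 1, 2 are all seen — plus an
-- OrderedDict rebuild in layer order 0, 1, 2 (objective: simpler).

-- ===== PORT A =====
-- 'flip_data[present_id]["PlaneInfo"][0][1]' for the entry under scan; Python's 'for present_id in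
-- flip_data' + 'flip_data[present_id]' is ported as iteration over the (key, value) items, since a
-- Python dict's keys are unique so the lookup yields exactly the current item's value.
def pvFlipLayerA (v : List (String × List (List Int))) : Int :=
  (PySem.List.pyGet? ((PySem.List.pyGet? (((PySem.Dict.mk v).get? "PlaneInfo").getD []) 0).getD []) 1).getD 0

-- 'notify_data[present_id][0]'
def pvNotifyLayerA (v : List Int) : Int := (PySem.List.pyGet? v 0).getD 0

-- inner 'for present_id in …: if layer_index == …: …; break'  =  first key whose layer matches
def pvFindA {α : Type} (items : List (Int × α)) (f : α → Int) (l : Int) : Option Int :=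
  match items with
  | [] => none
  | p :: rest => if l = f p.2 then some p.1 else pvFindA rest f l

-- first pair of loops: 'layers[layer_index] = []; layers[layer_index].append(present_id); break'
def pvFirstLoopA {α : Type} (items : List (Int × α)) (f : α → Int) : PySem.Dict Int (List Int) :=
  (PySem.List.pyRange 0 3 1).foldl (fun d l =>
    match pvFindA items f l with
    | some pid => d.insert l [pid]
    | none => d) PySem.Dict.empty

-- second pair of loops: scan 'reversed(…)', 'layers[layer_index].append(present_id); break'
def pvLastLoopA {α : Type} (items : List (Int × α)) (f : α → Int) (d0 : PySem.Dict Int (List Int)) : PySem.Dict Int (List Int) :=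
  (PySem.List.pyRange 0 3 1).foldl (fun d l =>
    match pvFindA items.reverse f l with
    | some pid => d.modify l [] (fun xs => xs ++ [pid])
    | none => d) d0

def get_first_and_last_entry (flip_data : List (Int × List (String × List (List Int)))) (notify_data : List (Int × List Int)) : (List (Int × List Int)) × (List (Int × List Int)) :=
  ((pvLastLoopA flip_data pvFlipLayerA (pvFirstLoopA flip_data pvFlipLayerA)).items,
   (pvLastLoopA notify_data pvNotifyLayerA (pvFirstLoopA notify_data pvNotifyLayerA)).items)

-- ===== PORT B =====
-- B's lambdas: 'lambda v: v["PlaneInfo"][0][1]' and 'lambda v: v[0]'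
def pvFlipLayerB (v : List (String × List (List Int))) : Int :=
  (PySem.List.pyGet? ((PySem.List.pyGet? (((PySem.Dict.mk v).get? "PlaneInfo").getD []) 0).getD []) 1).getD 0
def pvNotifyLayerB (v : List Int) : Int := (PySem.List.pyGet? v 0).getD 0

-- scan: one pass over the (key, value) items recording the first-seen present id per layer,
-- breaking once layers 0..2 are all found ('data[pid]' is the current item's value: keys unique)
def pvScanB {α : Type} (f : α → Int) : List (Int × α) → PySem.Dict Int Int → PySem.Dict Int Int
  | [], found => found
  | p :: rest, found =>
    if (PySem.List.pyRange 0 3 1).all (fun l => found.contains l) then found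
    else pvScanB f rest (if found.contains (f p.2) then found else found.insert (f p.2) p.1)

-- build: first = scan(data), last = scan(reversed(data));
-- OrderedDict((l, [first[l], last[l]]) for l in range(3) if l in first) — the keys l are distinct,
-- so the OrderedDict's items are exactly this pair list; 'last[l]' cannot raise KeyError ('l in
-- first' means layer l occurs in data, so the reversed scan finds it too), ported with getD
def pvBuildB {α : Type} (data : List (Int × α)) (f : α → Int) : List (Int × List Int) :=
  let first := pvScanB f data PySem.Dict.empty
  let last := pvScanB f data.reverse PySem.Dict.empty
  (PySem.List.pyRange 0 3 1).filterMap (fun l => (first.get? l).map (fun a => (l, [a, (last.get? l).getD 0])))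

def get_first_and_last_entry_alt (flip_data : List (Int × List (String × List (List Int)))) (notify_data : List (Int × List Int)) : (List (Int × List Int)) × (List (Int × List Int)) :=
  (pvBuildB flip_data pvFlipLayerB, pvBuildB notify_data pvNotifyLayerB)

-- ===== PRECONDITION & SPEC =====
-- well-formedness and layer field of an entry, written out independently of either port
def pvOkFlip (v : List (String × List (List Int))) : Bool :=
  match (PySem.Dict.mk v).get? "PlaneInfo" with
  | some planes => !planes.isEmpty && decide (2 ≤ (planes.headD []).length)
  | none => false
def pvOkNotify (v : List Int) : Bool := !v.isEmpty
def pvLayerFlip (v : List (String × List (List Int))) : Int :=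
  ((((PySem.Dict.mk v).get? "PlaneInfo").getD []).headD []).getD 1 0
def pvLayerNotify (v : List Int) : Int := v.headD 0

-- the scans over one dict raise no exception iff every entry is well-formed, or every layer
-- 0,1,2 has a well-formed match both before the first malformed entry and after the last one
def pvScansOk {α : Type} (data : List (Int × α)) (ok : α → Bool) (lay : α → Int) : Bool :=
  data.all (fun p => ok p.2) ||
  ([0, 1, 2] : List Int).all (fun l =>
    (data.takeWhile (fun p => ok p.2)).any (fun p => l == lay p.2)
    && (data.reverse.takeWhile (fun p => ok p.2)).any (fun p => l == lay p.2))

-- Pre_ holds exactly when the Pythons raise no KeyError/IndexError: either every entry is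
-- well-formed, or (per dict) each layer 0,1,2 matches a well-formed entry before the first
-- malformed one and after the last one, so the break-early scans never reach a malformed entry.
def Pre_get_first_and_last_entry (flip_data : List (Int × List (String × List (List Int)))) (notify_data : List (Int × List Int)) : Prop :=
  pvScansOk flip_data pvOkFlip pvLayerFlip = true ∧ pvScansOk notify_data pvOkNotify pvLayerNotify = true
instance (flip_data : List (Int × List (String × List (List Int)))) (notify_data : List (Int × List Int)) : Decidable (Pre_get_first_and_last_entry flip_data notify_data) := by unfold Pre_get_first_and_last_entry; infer_instance

def pvWitness_get_first_and_last_entry : (List (Int × List (String × List (List Int)))) × (List (Int × List Int)) :=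
  ([(4, [("PlaneInfo", [[9, 1]])]), (7, [("PlaneInfo", [[9, 1]])])], [(5, [0, 3])])

def Spec_get_first_and_last_entry (flip_data : List (Int × List (String × List (List Int)))) (notify_data : List (Int × List Int)) (out : (List (Int × List Int)) × (List (Int × List Int))) : Prop := out = get_first_and_last_entry_alt flip_data notify_data
instance (flip_data : List (Int × List (String × List (List Int)))) (notify_data : List (Int × List Int)) (out : (List (Int × List Int)) × (List (Int × List Int))) : Decidable (Spec_get_first_and_last_entry flip_data notify_data out) := by unfold Spec_get_first_and_last_entry; infer_instance

-- ===== CLAIM (what is proved, stated in full; the proofs are below) =====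
def Claim_equal_get_first_and_last_entry : Prop := ∀ (flip_data : List (Int × List (String × List (List Int)))) (notify_data : List (Int × List Int)), Dom_get_first_and_last_entry flip_data notify_data → Pre_get_first_and_last_entry flip_data notify_data → Spec_get_first_and_last_entry flip_data notify_data (get_first_and_last_entry flip_data notify_data)

-- ===== LEMMAS AND PROOFS =====
-- last key with layer l, default a (the value A's reversed scan finds when one exists)
def pvLastD {α : Type} (items : List (Int × α)) (f : α → Int) (l : Int) (a : Int) : Int :=
  items.foldl (fun acc p => if l = f p.2 then p.1 else acc) a

theorem pvLastD_cons {α : Type} (p : Int × α) (rest : List (Int × α)) (f : α → Int) (l a : Int) :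
    pvLastD (p :: rest) f l a = pvLastD rest f l (if l = f p.2 then p.1 else a) := rfl

theorem pvLastD_of_find_none {α : Type} (items : List (Int × α)) (f : α → Int) (l : Int) (a : Int)
    (h : pvFindA items f l = none) : pvLastD items f l a = a := by
  induction items generalizing a with
  | nil => rfl
  | cons p rest ih =>
    unfold pvFindA at h
    by_cases hl : l = f p.2
    · simp [hl] at h
    · simp only [if_neg hl] at h
      rw [pvLastD_cons, if_neg hl, ih a h]

theorem pvLastD_congr {α : Type} (items : List (Int × α)) (f : α → Int) (l : Int) (a b x : Int)
    (h : pvFindA items f l = some x) : pvLastD items f l a = pvLastD items f l b := by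
  induction items generalizing a b with
  | nil => simp [pvFindA] at h
  | cons p rest ih =>
    unfold pvFindA at h
    by_cases hl : l = f p.2
    · rw [pvLastD_cons, pvLastD_cons, if_pos hl, if_pos hl]
    · simp only [if_neg hl] at h
      rw [pvLastD_cons, pvLastD_cons, if_neg hl, if_neg hl, ih a b h]

theorem pvFindA_append {α : Type} (as bs : List (Int × α)) (f : α → Int) (l : Int) :
    pvFindA (as ++ bs) f l = match pvFindA as f l with
      | some x => some x
      | none => pvFindA bs f l := by
  induction as with
  | nil => simp [pvFindA]
  | cons p rest ih =>
    by_cases hl : l = f p.2 <;> simp [pvFindA, hl, ih]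

-- A's reversed scan finds the LAST matching key (when a match exists)
theorem pvFindA_reverse {α : Type} (items : List (Int × α)) (f : α → Int) (l : Int) :
    pvFindA items.reverse f l = (pvFindA items f l).map (fun fp => pvLastD items f l fp) := by
  induction items with
  | nil => rfl
  | cons p rest ih =>
    rw [List.reverse_cons, pvFindA_append, ih]
    by_cases hl : l = f p.2
    · rcases hrest : pvFindA rest f l with _ | fp
      · simp only [hrest, Option.map_none, Option.map_some, pvFindA, if_pos hl,
          pvLastD_cons, pvLastD_of_find_none rest f l p.1 hrest]
      · simp only [hrest, Option.map_some, pvFindA, if_pos hl, pvLastD_cons,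
          pvLastD_congr rest f l p.1 fp fp hrest]
    · rcases hrest : pvFindA rest f l with _ | fp
      · simp only [hrest, Option.map_none, pvFindA, if_neg hl]
      · simp only [hrest, Option.map_some, pvFindA, if_neg hl, pvLastD_cons]

-- B's early-stopped scan holds, at each layer 0/1/2, exactly the first matching key
theorem pvScanB_get? {α : Type} (f : α → Int) (l : Int) (hl : l = 0 ∨ l = 1 ∨ l = 2)
    (data : List (Int × α)) (found : PySem.Dict Int Int) :
    (pvScanB f data found).get? l =
      match found.get? l with
      | some x => some x
      | none => pvFindA data f l := by
  induction data generalizing found with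
  | nil =>
    simp only [pvScanB]
    rcases found.get? l with _ | x <;> rfl
  | cons p rest ih =>
    rw [pvScanB]
    by_cases hb : ((PySem.List.pyRange 0 3 1).all (fun l => found.contains l)) = true
    · rw [if_pos hb]
      have hc : found.contains l = true := by
        have hR : PySem.List.pyRange 0 3 1 = [0, 1, 2] := by decide
        rw [hR] at hb
        simp only [List.all_eq_true, List.mem_cons, List.not_mem_nil] at hb
        rcases hl with h | h | h <;> subst h <;> exact hb _ (by simp)
      obtain ⟨x, hx⟩ := Option.isSome_iff_exists.mp
        (show (found.get? l).isSome by rw [← PySem.Dict.contains_eq_isSome_get? found l]; exact hc)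
      rw [hx]
    · rw [if_neg hb, ih]
      rcases hfl : found.get? l with _ | x
      · have hcl : found.contains l = false := by
          rw [PySem.Dict.contains_eq_isSome_get?, hfl]; rfl
        by_cases hfp : l = f p.2
        · rw [← hfp, hcl, if_neg (by simp)]
          rw [PySem.Dict.get?_insert_self]
          simp [pvFindA, ← hfp]
        · have : (if found.contains (f p.2) = true then found
              else found.insert (f p.2) p.1).get? l = found.get? l := by
            split
            · rfl
            · exact PySem.Dict.get?_insert_of_ne _ _ hfp
          rw [this, hfl]
          simp [pvFindA, hfp]
      · have : (if found.contains (f p.2) = true then found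
            else found.insert (f p.2) p.1).get? l = found.get? l := by
          split
          · rfl
          · refine PySem.Dict.get?_insert_of_ne _ _ (fun h => ?_)
            rename_i hnc
            exact hnc (by rw [PySem.Dict.contains_eq_isSome_get?, ← h, hfl]; rfl)
        rw [this, hfl]

-- one side (flip or notify) of the equivalence
theorem pvSide_eq {α : Type} (data : List (Int × α)) (fA : α → Int) :
    (pvLastLoopA data fA (pvFirstLoopA data fA)).items = pvBuildB data fA := by
  have hR : PySem.List.pyRange 0 3 1 = [0, 1, 2] := by decide
  have hfirst : ∀ l, (l = 0 ∨ l = 1 ∨ l = 2) →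
      (pvScanB fA data PySem.Dict.empty).get? l = pvFindA data fA l := by
    intro l hl
    rw [pvScanB_get? fA l hl data PySem.Dict.empty, PySem.Dict.get?_empty]
  have hlast : ∀ l, (l = 0 ∨ l = 1 ∨ l = 2) →
      (pvScanB fA data.reverse PySem.Dict.empty).get? l = pvFindA data.reverse fA l := by
    intro l hl
    rw [pvScanB_get? fA l hl data.reverse PySem.Dict.empty, PySem.Dict.get?_empty]
  unfold pvLastLoopA pvFirstLoopA pvBuildB
  rw [hR]
  simp only [List.foldl, List.filterMap,
    hfirst 0 (by tauto), hfirst 1 (by tauto), hfirst 2 (by tauto),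
    hlast 0 (by tauto), hlast 1 (by tauto), hlast 2 (by tauto), pvFindA_reverse]
  rcases h0 : pvFindA data fA 0 with _ | a0 <;>
    rcases h1 : pvFindA data fA 1 with _ | a1 <;>
    rcases h2 : pvFindA data fA 2 with _ | a2 <;>
      simp [Option.map] <;> rfl

-- ===== VERDICT (by name: the statement is the Claim_ definition above) =====
theorem get_first_and_last_entry_spec : Claim_equal_get_first_and_last_entry := by
  intro flip_data notify_data _ _
  unfold Spec_get_first_and_last_entry get_first_and_last_entry get_first_and_last_entry_alt
  exact congrArg₂ Prod.mk (pvSide_eq flip_data pvFlipLayerA) (pvSide_eq notify_data pvNotifyLayerA)
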